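-- pv_equiv track=rewrite | github.com/elijahhoudini/Forexdaytrader-auracle- | auracle.py | is_risky_token
-- ===== SOURCE A (Python) =====
-- def is_risky_token(token_name: str) -> bool:
--     """Enhanced risk detection for suspicious tokens."""
--     blacklist = [
--         "rug", "scam", "honeypot", "jeet", "shitcoin",
--         "elon", "pepe", "moon", "safe", "baby", "doge",
--         "cum", "pussy", "shit", "fuck", "damn"
--     ]
--     token_lower = token_name.lower()
--     return any(word in token_lower for word in blacklist)
-- ===== SOURCE B (Python) =====
-- _BLACKLIST = (
--     "rug", "scam", "honeypot", "jeet", "shitcoin",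
--     "elon", "pepe", "moon", "safe", "baby", "doge",
--     "cum", "pussy", "shit", "fuck", "damn",
-- )
--
-- def is_risky_token(token_name: str) -> bool:
--     """Single left-to-right scan: at each position, test whether any
--     blacklisted word starts there."""
--     s = token_name.lower()
--     for i in range(len(s)):
--         for w in _BLACKLIST:
--             if s.startswith(w, i):
--                 return True
--     return False
-- ===== Notes on version B (the rewrite author's own statement) =====
-- stated objective: alternative
-- what changed: Instead of running a separate substring search for each blacklisted word, B makes one left-to-right scan over the lowercased string and at each position tests whether any blacklisted word starts there.
import Mathlib
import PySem

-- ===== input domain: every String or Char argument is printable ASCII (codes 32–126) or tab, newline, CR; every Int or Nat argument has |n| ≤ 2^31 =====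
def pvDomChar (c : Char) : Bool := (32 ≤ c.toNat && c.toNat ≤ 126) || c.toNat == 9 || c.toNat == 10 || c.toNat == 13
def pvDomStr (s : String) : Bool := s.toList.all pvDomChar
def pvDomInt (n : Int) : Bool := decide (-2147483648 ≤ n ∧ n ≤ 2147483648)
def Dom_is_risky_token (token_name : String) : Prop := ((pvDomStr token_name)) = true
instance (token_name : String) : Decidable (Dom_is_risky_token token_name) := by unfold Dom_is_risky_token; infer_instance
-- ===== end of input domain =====

-- B replaces the per-word substring searches with one left-to-right scan checking every
-- blacklisted word as a prefix at each position (alternative decomposition, same cost class).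

-- ===== PORT A =====
def pvBlacklist : List String :=
  ["rug", "scam", "honeypot", "jeet", "shitcoin",
   "elon", "pepe", "moon", "safe", "baby", "doge",
   "cum", "pussy", "shit", "fuck", "damn"]

def is_risky_token (token_name : String) : Bool :=
  let token_lower := PySem.Str.lower token_name
  pvBlacklist.any (fun word => PySem.Str.isIn word token_lower)

-- ===== PORT B =====
def pvBlacklistAlt : List (List Char) :=
  [['r', 'u', 'g'],
   ['s', 'c', 'a', 'm'],
   ['h', 'o', 'n', 'e', 'y', 'p', 'o', 't'],
   ['j', 'e', 'e', 't'],
   ['s', 'h', 'i', 't', 'c', 'o', 'i', 'n'],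
   ['e', 'l', 'o', 'n'],
   ['p', 'e', 'p', 'e'],
   ['m', 'o', 'o', 'n'],
   ['s', 'a', 'f', 'e'],
   ['b', 'a', 'b', 'y'],
   ['d', 'o', 'g', 'e'],
   ['c', 'u', 'm'],
   ['p', 'u', 's', 's', 'y'],
   ['s', 'h', 'i', 't'],
   ['f', 'u', 'c', 'k'],
   ['d', 'a', 'm', 'n']]

-- the position loop of Source B: s.startswith(w, i) at position i = prefix test on the i-th suffix
def pvScan : List Char → Bool
  | [] => false
  | c :: t => pvBlacklistAlt.any (fun w => PySem.Chars.startswith (c :: t) w) || pvScan t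

def is_risky_token_alt (token_name : String) : Bool :=
  pvScan (PySem.Str.lower token_name).toList

-- ===== PRECONDITION & SPEC =====
def Spec_is_risky_token (token_name : String) (out : Bool) : Prop := out = is_risky_token_alt token_name
instance (token_name : String) (out : Bool) : Decidable (Spec_is_risky_token token_name out) := by unfold Spec_is_risky_token; infer_instance

-- ===== CLAIM (what is proved, stated in full; the proofs are below) =====
def Claim_equal_is_risky_token : Prop := ∀ (token_name : String), Dom_is_risky_token token_name → Spec_is_risky_token token_name (is_risky_token token_name)

-- ===== LEMMAS AND PROOFS =====

theorem pvBlacklistAlt_eq : pvBlacklistAlt = pvBlacklist.map String.toList := by decide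

theorem pvBlacklistAlt_ne_nil : ∀ w ∈ pvBlacklistAlt, w ≠ [] := by decide

theorem pvScan_iff (cs : List Char) :
    pvScan cs = true ↔ ∃ w ∈ pvBlacklistAlt, w <:+: cs := by
  induction cs with
  | nil =>
      simp only [pvScan]
      constructor
      · intro h; exact absurd h (by simp)
      · rintro ⟨w, hw, hinf⟩
        exact absurd (List.eq_nil_of_infix_nil hinf) (pvBlacklistAlt_ne_nil w hw)
  | cons c t ih =>
      simp only [pvScan, Bool.or_eq_true, List.any_eq_true, PySem.Chars.startswith_iff, ih,
        List.infix_cons_iff]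
      constructor
      · rintro (⟨w, hw, hp⟩ | ⟨w, hw, hi⟩)
        · exact ⟨w, hw, Or.inl hp⟩
        · exact ⟨w, hw, Or.inr hi⟩
      · rintro ⟨w, hw, hp | hi⟩
        · exact Or.inl ⟨w, hw, hp⟩
        · exact Or.inr ⟨w, hw, hi⟩

-- ===== VERDICT (by name: the statement is the Claim_ definition above) =====
theorem is_risky_token_spec : Claim_equal_is_risky_token := by
  intro token_name _
  show is_risky_token token_name = is_risky_token_alt token_name
  simp only [is_risky_token, is_risky_token_alt]
  rw [Bool.eq_iff_iff, pvScan_iff, List.any_eq_true]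
  simp only [PySem.Str.isIn_iff_infix, pvBlacklistAlt_eq, List.mem_map]
  constructor
  · rintro ⟨w, hw, h⟩; exact ⟨w.toList, ⟨w, hw, rfl⟩, h⟩
  · rintro ⟨_, ⟨w, hw, rfl⟩, h⟩; exact ⟨w, hw, h⟩
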